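-- pv_equiv track=rewrite | github.com/loren-jiang/hitsDB | my_utils/utility_functions.py | items_at
-- ===== SOURCE A (Python) =====
-- def chunk_list(l,n):
--     return [l[i * n:(i + 1) * n] for i in range((len(l) + n - 1) // n )]
--
-- def items_at(lst, chunk_size, idxs):
--     assert max(idxs) < chunk_size
--     assert len(lst) % chunk_size == 0
--     chunked = chunk_list(lst, chunk_size)
--     num_elems = len(idxs)*len(chunked)
--     out = [None] * num_elems
--     i = 0
--     for c in chunked:
--         for k in idxs:
--             out[i] = c[k]
--             i += 1
--     return out
-- ===== SOURCE B (Python) =====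
-- def items_at(lst, chunk_size, idxs):
--     assert max(idxs) < chunk_size
--     assert len(lst) % chunk_size == 0
--     return [lst[c * chunk_size + (k if k >= 0 else k + chunk_size)]
--             for c in range(len(lst) // chunk_size) for k in idxs]
-- ===== Notes on version B (the rewrite author's own statement) =====
-- stated objective: simpler
-- what changed: Drops the chunking phase and the preallocated output buffer with a running write index: B computes each element directly by flat arithmetic indexing lst[c*chunk_size + k'] (normalising negative chunk-relative indices) in a single flat comprehension, with no intermediate list-of-sublists and no index bookkeeping.
-- outside the precondition, e.g. on items_at([1, 2], -2, [-3]): A returns [], B returns []; on items_at([], 3, [-5]): A returns [], B returns []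
import Mathlib
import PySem

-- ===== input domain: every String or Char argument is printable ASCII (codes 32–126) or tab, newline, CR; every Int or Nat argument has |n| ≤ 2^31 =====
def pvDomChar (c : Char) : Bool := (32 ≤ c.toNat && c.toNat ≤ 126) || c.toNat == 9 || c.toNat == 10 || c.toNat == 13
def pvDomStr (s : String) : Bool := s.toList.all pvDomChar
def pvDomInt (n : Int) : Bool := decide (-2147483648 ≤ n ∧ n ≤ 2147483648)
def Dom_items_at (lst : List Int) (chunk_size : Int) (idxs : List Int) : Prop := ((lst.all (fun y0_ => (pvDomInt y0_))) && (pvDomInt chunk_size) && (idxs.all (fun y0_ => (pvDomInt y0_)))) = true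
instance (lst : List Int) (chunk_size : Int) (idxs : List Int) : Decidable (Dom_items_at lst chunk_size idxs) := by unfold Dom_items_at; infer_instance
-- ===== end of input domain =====

-- B drops A's chunking phase and preallocated write-index buffer in favour of a single flat
-- arithmetic-index comprehension (objective: simpler; return value only, no mutation involved).


-- ===== PORT A =====
-- chunk_list(l, n) = [l[i*n:(i+1)*n] for i in range((len(l)+n-1)//n)]
def chunkListA (l : List Int) (n : Int) : List (List Int) :=
  (PySem.List.pyRange 0 (PySem.Int.floordiv ((l.length : Int) + n - 1) n) 1).map
    (fun i => PySem.List.slice l (some (i * n)) (some ((i + 1) * n)))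

-- out = [None]*num_elems; out[i] = c[k]; i += 1  — ported as a (buffer, index) fold with pySetD;
-- the None placeholder is ported as 0 (every slot is overwritten before being read). The asserts and
-- c[k] raise exactly outside Pre_, where pyGetD's default stands in for the exception.
def items_at (lst : List Int) (chunk_size : Int) (idxs : List Int) : List Int :=
  let chunked := chunkListA lst chunk_size
  let numElems := idxs.length * chunked.length
  let res := chunked.foldl
    (fun (s : List Int × Int) c =>
      idxs.foldl (fun s k => (PySem.List.pySetD s.1 s.2 (PySem.List.pyGetD c k 0), s.2 + 1)) s)
    (List.replicate numElems 0, 0)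
  res.1

-- ===== PORT B =====
-- [lst[c*chunk_size + (k if k >= 0 else k + chunk_size)] for c in range(len(lst)//chunk_size) for k in idxs]
def items_at_alt (lst : List Int) (chunk_size : Int) (idxs : List Int) : List Int :=
  (PySem.List.pyRange 0 (PySem.Int.floordiv (lst.length : Int) chunk_size) 1).flatMap
    (fun c => idxs.map (fun k =>
      PySem.List.pyGetD lst (c * chunk_size + (if 0 ≤ k then k else k + chunk_size)) 0))

-- ===== PRECONDITION & SPEC =====
-- Pre_ excludes exactly the inputs on which A raises — empty idxs (ValueError from max), a
-- chunk-relative index outside [-chunk_size, chunk_size) (AssertionError or IndexError), a length not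
-- divisible by chunk_size (AssertionError), chunk_size = 0 (ZeroDivisionError) — plus the degenerate
-- non-positive chunk_size, on which A raises or returns [] only by accident of floor division (cited).
def Pre_items_at (lst : List Int) (chunk_size : Int) (idxs : List Int) : Prop :=
  0 < chunk_size ∧ PySem.Int.mod (lst.length : Int) chunk_size = 0 ∧ idxs ≠ [] ∧
    ∀ k ∈ idxs, -chunk_size ≤ k ∧ k < chunk_size
instance (lst : List Int) (chunk_size : Int) (idxs : List Int) : Decidable (Pre_items_at lst chunk_size idxs) := by unfold Pre_items_at; infer_instance

def pvWitness_items_at : List Int × Int × List Int := ([1, 2, 3, 4, 5, 6], 2, [0, -1])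

def Spec_items_at (lst : List Int) (chunk_size : Int) (idxs : List Int) (out : List Int) : Prop := out = items_at_alt lst chunk_size idxs
instance (lst : List Int) (chunk_size : Int) (idxs : List Int) (out : List Int) : Decidable (Spec_items_at lst chunk_size idxs out) := by unfold Spec_items_at; infer_instance

-- ===== CLAIM (what is proved, stated in full; the proofs are below) =====
def Claim_equal_items_at : Prop := ∀ (lst : List Int) (chunk_size : Int) (idxs : List Int), Dom_items_at lst chunk_size idxs → Pre_items_at lst chunk_size idxs → Spec_items_at lst chunk_size idxs (items_at lst chunk_size idxs)

-- ===== LEMMAS AND PROOFS =====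

-- One inner pass of A's fill loop: writing l.map g sequentially starting at index pre.length.
theorem fill_one_block {α : Type} (g : α → Int) :
    ∀ (l : List α) (pre rest : List Int), l.length ≤ rest.length →
    l.foldl (fun (s : List Int × Int) x => (PySem.List.pySetD s.1 s.2 (g x), s.2 + 1))
      (pre ++ rest, (pre.length : Int))
    = (pre ++ l.map g ++ rest.drop l.length, ((pre.length + l.length : Nat) : Int)) := by
  intro l
  induction l with
  | nil => intro pre rest h; simp
  | cons x l ih =>
    intro pre rest h
    match rest with
    | [] => simp at h
    | r0 :: rest' =>
      simp only [List.foldl_cons]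
      have hset : PySem.List.pySetD (pre ++ r0 :: rest') (pre.length : Int) (g x)
          = (pre ++ [g x]) ++ rest' := by
        rw [PySem.List.pySetD_natCast]
        simp
      have hidx : ((pre.length : Int) + 1) = (((pre ++ [g x]).length : Nat) : Int) := by
        simp
      rw [hset, hidx]
      rw [ih (pre ++ [g x]) rest' (by simp at h ⊢; omega)]
      simp [Nat.add_comm, Nat.add_left_comm]

-- A's whole double loop fills the preallocated buffer with exactly the flatMap.
theorem fill_blocks (idxs : List Int) (g : List Int → Int → Int) :
    ∀ (cs : List (List Int)) (pre : List Int),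
    cs.foldl (fun (s : List Int × Int) c =>
        idxs.foldl (fun s k => (PySem.List.pySetD s.1 s.2 (g c k), s.2 + 1)) s)
      (pre ++ List.replicate (idxs.length * cs.length) 0, (pre.length : Int))
    = (pre ++ cs.flatMap (fun c => idxs.map (g c)),
       ((pre.length + idxs.length * cs.length : Nat) : Int)) := by
  intro cs
  induction cs with
  | nil => intro pre; simp
  | cons c cs ih =>
    intro pre
    simp only [List.foldl_cons, List.length_cons]
    have hrep : List.replicate (idxs.length * (cs.length + 1)) (0 : Int)
        = List.replicate idxs.length 0 ++ List.replicate (idxs.length * cs.length) 0 := by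
      rw [List.replicate_append_replicate]; ring_nf
    rw [hrep]
    rw [fill_one_block (g c) idxs pre (List.replicate idxs.length 0 ++ List.replicate (idxs.length * cs.length) 0) (by simp)]
    have hdrop : (List.replicate idxs.length (0:Int) ++ List.replicate (idxs.length * cs.length) 0).drop idxs.length = List.replicate (idxs.length * cs.length) 0 := by simp
    rw [hdrop]
    have hlen : ((pre.length + idxs.length : Nat) : Int) = (((pre ++ idxs.map (g c)).length : Nat) : Int) := by simp
    rw [List.append_assoc pre (idxs.map (g c)), ← List.append_assoc pre (idxs.map (g c)), hlen]
    rw [ih (pre ++ idxs.map (g c))]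
    simp [Nat.mul_succ]
    omega

theorem items_at_flat (lst : List Int) (chunk_size : Int) (idxs : List Int) :
    items_at lst chunk_size idxs
      = (chunkListA lst chunk_size).flatMap
          (fun c => idxs.map (fun k => PySem.List.pyGetD c k 0)) := by
  have h := fill_blocks idxs (fun c k => PySem.List.pyGetD c k 0) (chunkListA lst chunk_size) []
  simp only [List.nil_append, List.length_nil, Nat.cast_zero, Nat.zero_add] at h
  simp only [items_at]
  rw [h]

theorem chunk_getD (lst : List Int) (a m i : Nat) (hi : i < m) :
    ((lst.drop a).take m).getD i 0 = lst.getD (a + i) 0 := by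
  rw [List.getD_eq_getElem?_getD, List.getD_eq_getElem?_getD]
  rw [List.getElem?_take_of_lt hi, List.getElem?_drop]

theorem flatMap_range_congr {α : Type} (q : Nat) (F G : Nat → List α)
    (h : ∀ j < q, F j = G j) : (List.range q).flatMap F = (List.range q).flatMap G := by
  induction q with
  | zero => rfl
  | succ n ih =>
    rw [List.range_succ, List.flatMap_append, List.flatMap_append,
      ih (fun j hj => h j (by omega))]
    simp [h n (by omega)]

theorem flat_eq_alt (lst : List Int) (chunk_size : Int) (idxs : List Int)
    (hpos : 0 < chunk_size) (hmod : PySem.Int.mod (lst.length : Int) chunk_size = 0)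
    (hbound : ∀ k ∈ idxs, -chunk_size ≤ k ∧ k < chunk_size) :
    (chunkListA lst chunk_size).flatMap
          (fun c => idxs.map (fun k => PySem.List.pyGetD c k 0))
      = items_at_alt lst chunk_size idxs := by
  obtain ⟨m, rfl⟩ : ∃ m : Nat, chunk_size = (m : Int) := ⟨chunk_size.toNat, (Int.toNat_of_nonneg hpos.le).symm⟩
  have hm : 0 < m := by exact_mod_cast hpos
  have hdvd : m ∣ lst.length := by
    have := (PySem.Int.mod_eq_zero_iff_dvd (lst.length : Int) (m : Int)).mp hmod
    exact_mod_cast this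
  obtain ⟨q, hL⟩ : ∃ q, lst.length = q * m := ⟨lst.length / m, (Nat.div_mul_cancel hdvd).symm⟩
  have hA : PySem.Int.floordiv ((lst.length : Int) + (m : Int) - 1) (m : Int) = (q : Int) := by
    have h1 : ((lst.length : Int) + (m : Int) - 1) = ((lst.length + m - 1 : Nat) : Int) := by
      push_cast [Nat.cast_sub (by omega : 1 ≤ lst.length + m)]; ring
    rw [h1, PySem.Int.floordiv_natCast]
    have h2 : lst.length + m - 1 = (m - 1) + q * m := by omega
    rw [h2, Nat.add_mul_div_right _ _ hm, Nat.div_eq_of_lt (by omega)]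
    simp
  have hB : PySem.Int.floordiv (lst.length : Int) (m : Int) = (q : Int) := by
    rw [PySem.Int.floordiv_natCast, hL, Nat.mul_div_cancel _ hm]
  unfold chunkListA items_at_alt
  rw [hA, hB, PySem.List.pyRange_zero_natCast]
  simp only [List.map_map, List.flatMap_map]
  apply flatMap_range_congr
  intro j hj
  have hjm : j * m + m ≤ lst.length := by
    rw [hL]
    calc j * m + m = (j + 1) * m := by ring
      _ ≤ q * m := Nat.mul_le_mul_right m hj
  simp only [Function.comp]
  apply List.map_congr_left
  intro k hk
  obtain ⟨hk1, hk2⟩ := hbound k hk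
  have hslice : PySem.List.slice lst (some ((j : Int) * (m : Int))) (some (((j : Int) + 1) * (m : Int)))
      = (lst.drop (j * m)).take m := by
    have e1 : ((j : Int) * (m : Int)) = ((j * m : Nat) : Int) := by push_cast; ring
    have e2 : (((j : Int) + 1) * (m : Int)) = ((j * m + m : Nat) : Int) := by push_cast; ring
    rw [e1, e2, PySem.List.slice_natCast]
    congr 1
    omega
  rw [hslice]
  have hlen : ((lst.drop (j * m)).take m).length = m := by
    simp; omega
  by_cases h0 : 0 ≤ k
  · obtain ⟨kn, rfl⟩ : ∃ kn : Nat, k = (kn : Int) := ⟨k.toNat, (Int.toNat_of_nonneg h0).symm⟩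
    have hkn : kn < m := by exact_mod_cast hk2
    rw [PySem.List.pyGetD_natCast, chunk_getD lst (j*m) m kn hkn, if_pos h0]
    have e3 : ((j : Int) * (m : Int) + (kn : Int)) = ((j * m + kn : Nat) : Int) := by push_cast; ring
    rw [e3, PySem.List.pyGetD_natCast]
  · obtain ⟨kn, rfl⟩ : ∃ kn : Nat, k = -(kn : Int) := ⟨(-k).toNat, by omega⟩
    have hkn1 : 0 < kn := by omega
    have hkn2 : kn ≤ m := by omega
    rw [PySem.List.pyGetD_neg_natCast _ kn 0 hkn1 (by rw [hlen]; omega), if_neg h0]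
    have e4 : ((j : Int) * (m : Int) + (-(kn : Int) + (m : Int))) = ((j * m + (m - kn) : Nat) : Int) := by
      push_cast [Nat.cast_sub hkn2]; ring
    rw [e4, PySem.List.pyGetD_natCast]
    rw [List.getD_eq_getElem _ _ (by omega : j * m + (m - kn) < lst.length)]
    simp only [hlen, List.getElem_take, List.getElem_drop]

-- ===== VERDICT (by name: the statement is the Claim_ definition above) =====
theorem items_at_spec : Claim_equal_items_at := by
  intro lst chunk_size idxs _ hpre
  obtain ⟨hpos, hmod, _, hbound⟩ := hpre
  unfold Spec_items_at
  rw [items_at_flat, flat_eq_alt lst chunk_size idxs hpos hmod hbound]
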